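-- pv_equiv track=rewrite | github.com/warp0x0/warp-mediacenter | warp_mediacenter/backend/information_handlers/tmdb_manager.py | _preferred_size
-- ===== SOURCE A (Python) =====
-- from typing import Any, Dict, Mapping, Optional, Sequence
--
-- def _preferred_size(sizes: Sequence[str]) -> str:
--     if not sizes:
--         return "original"
--     preferred_order = ("w780", "w500", "w342", "w300", "w185", "original")
--     for candidate in preferred_order:
--         if candidate in sizes:
--             return candidate
--     return sizes[-1]
-- ===== SOURCE B (Python) =====
-- def _preferred_size(sizes):
--     if not sizes:
--         return "original"
--     rank = {"w780": 0, "w500": 1, "w342": 2, "w300": 3, "w185": 4, "original": 5}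
--     best = None
--     for s in sizes:
--         r = rank.get(s)
--         if r is not None and (best is None or r < best[0]):
--             best = (r, s)
--     return best[1] if best is not None else sizes[-1]
-- ===== Notes on version B (the rewrite author's own statement) =====
-- stated objective: alternative
-- what changed: Instead of scanning the fixed preference tuple and doing a membership test in sizes for each candidate, B builds a rank table once and makes a single pass over sizes tracking the minimum-rank match, falling back to sizes[-1].
import Mathlib
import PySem

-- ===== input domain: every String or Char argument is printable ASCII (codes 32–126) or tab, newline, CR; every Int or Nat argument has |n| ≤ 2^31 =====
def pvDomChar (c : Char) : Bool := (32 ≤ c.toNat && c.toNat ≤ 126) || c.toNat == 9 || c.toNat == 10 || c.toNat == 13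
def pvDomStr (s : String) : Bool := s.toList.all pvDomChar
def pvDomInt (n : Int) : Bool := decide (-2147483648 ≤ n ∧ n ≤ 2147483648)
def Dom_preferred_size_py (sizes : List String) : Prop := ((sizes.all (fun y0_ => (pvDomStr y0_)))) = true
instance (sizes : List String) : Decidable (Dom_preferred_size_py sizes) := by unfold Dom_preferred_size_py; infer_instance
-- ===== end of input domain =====

-- B replaces A's scan of the fixed preference tuple (a membership test in `sizes`
-- per candidate) by one pass over `sizes` tracking the minimum-rank match in a rank
-- table; same fallbacks (empty → "original", no match → sizes[-1]).

-- ===== PORT A =====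
-- the for-loop over preferred_order with its early return
def pvLoopA (sizes : List String) : List String → Option String
  | [] => none
  | c :: rest => if c ∈ sizes then some c else pvLoopA sizes rest

def preferred_size_py (sizes : List String) : String :=
  if sizes = [] then "original"
  else
    match pvLoopA sizes ["w780", "w500", "w342", "w300", "w185", "original"] with
    | some c => c
    | none => (PySem.List.pyGet? sizes (-1)).getD ""  -- sizes ≠ [] here, so pyGet? is some

-- ===== PORT B =====
def pvRank : PySem.Dict String Int :=
  PySem.Dict.ofList [("w780", 0), ("w500", 1), ("w342", 2), ("w300", 3), ("w185", 4), ("original", 5)]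

-- the body of B's for-loop: keep the lowest-rank match seen so far
def pvStep (best : Option (Int × String)) (s : String) : Option (Int × String) :=
  match pvRank.get? s with
  | none => best
  | some r =>
    match best with
    | none => some (r, s)
    | some b => if r < b.1 then some (r, s) else best

def preferred_size_py_alt (sizes : List String) : String :=
  if sizes = [] then "original"
  else
    match sizes.foldl pvStep none with
    | some b => b.2
    | none => (PySem.List.pyGet? sizes (-1)).getD ""  -- sizes ≠ [] here, so pyGet? is some

-- ===== PRECONDITION & SPEC =====
def Spec_preferred_size_py (sizes : List String) (out : String) : Prop := out = preferred_size_py_alt sizes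
instance (sizes : List String) (out : String) : Decidable (Spec_preferred_size_py sizes out) := by unfold Spec_preferred_size_py; infer_instance

-- ===== CLAIM (what is proved, stated in full; the proofs are below) =====
def Claim_equal_preferred_size_py : Prop := ∀ (sizes : List String), Dom_preferred_size_py sizes → Spec_preferred_size_py sizes (preferred_size_py sizes)

-- ===== LEMMAS AND PROOFS =====

-- the canonical name of each rank
def pvName (r : Int) : String :=
  if r = 0 then "w780" else if r = 1 then "w500" else if r = 2 then "w342"
  else if r = 3 then "w300" else if r = 4 then "w185" else "original"

-- min on Option Int (none = no match yet)
def pvOmin : Option Int → Option Int → Option Int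
  | none, y => y
  | some a, none => some a
  | some a, some b => some (if b < a then b else a)

-- the minimal rank of any member of p
def pvMrank (p : List String) : Option Int :=
  p.foldr (fun s acc => pvOmin (pvRank.get? s) acc) none

theorem pvRank_get (s : String) :
    pvRank.get? s =
      if "w780" = s then some 0 else if "w500" = s then some 1 else if "w342" = s then some 2
      else if "w300" = s then some 3 else if "w185" = s then some 4
      else if "original" = s then some 5 else none := by
  have h : pvRank = PySem.Dict.mk [("w780", 0), ("w500", 1), ("w342", 2), ("w300", 3), ("w185", 4), ("original", 5)] := by decide
  rw [h]
  simp only [PySem.Dict.get?, PySem.Dict.items, List.find?]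
  by_cases h0 : "w780" = s
  · simp [← h0]
  by_cases h1 : "w500" = s
  · simp [← h1, h0]
  by_cases h2 : "w342" = s
  · simp [← h2, h0, h1]
  by_cases h3 : "w300" = s
  · simp [← h3, h0, h1, h2]
  by_cases h4 : "w185" = s
  · simp [← h4, h0, h1, h2, h3]
  by_cases h5 : "original" = s
  · simp [← h5, h0, h1, h2, h3, h4]
  · have b0 : ("w780" == s) = false := beq_eq_false_iff_ne.mpr h0
    have b1 : ("w500" == s) = false := beq_eq_false_iff_ne.mpr h1
    have b2 : ("w342" == s) = false := beq_eq_false_iff_ne.mpr h2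
    have b3 : ("w300" == s) = false := beq_eq_false_iff_ne.mpr h3
    have b4 : ("w185" == s) = false := beq_eq_false_iff_ne.mpr h4
    have b5 : ("original" == s) = false := beq_eq_false_iff_ne.mpr h5
    simp [b0, b1, b2, b3, b4, b5, h0, h1, h2, h3, h4, h5]

theorem pvRank_name {s : String} {r : Int} (h : pvRank.get? s = some r) :
    s = pvName r ∧ 0 ≤ r ∧ r ≤ 5 := by
  rw [pvRank_get] at h
  split_ifs at h with h1 h2 h3 h4 h5 h6
  · injection h with h'; subst h'; exact ⟨by rw [← h1]; norm_num [pvName], by norm_num⟩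
  · injection h with h'; subst h'; exact ⟨by rw [← h2]; norm_num [pvName], by norm_num⟩
  · injection h with h'; subst h'; exact ⟨by rw [← h3]; norm_num [pvName], by norm_num⟩
  · injection h with h'; subst h'; exact ⟨by rw [← h4]; norm_num [pvName], by norm_num⟩
  · injection h with h'; subst h'; exact ⟨by rw [← h5]; norm_num [pvName], by norm_num⟩
  · injection h with h'; subst h'; exact ⟨by rw [← h6]; norm_num [pvName], by norm_num⟩

theorem pvOmin_none_right (x : Option Int) : pvOmin x none = x := by cases x <;> rfl

theorem pvOmin_some_some (a b : Int) : pvOmin (some a) (some b) = some (min a b) := by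
  simp only [pvOmin, min_def]
  congr 1
  split_ifs <;> omega

theorem pvOmin_assoc (x y z : Option Int) : pvOmin (pvOmin x y) z = pvOmin x (pvOmin y z) := by
  cases x <;> cases y <;> cases z <;>
    first
    | rfl
    | (simp only [pvOmin, Option.some.injEq]; split_ifs <;> omega)

theorem pvStep_canon (ro : Option Int) (s : String) :
    pvStep (ro.map (fun r => (r, pvName r))) s =
      (pvOmin ro (pvRank.get? s)).map (fun r => (r, pvName r)) := by
  cases hr : pvRank.get? s with
  | none => cases ro <;> simp [pvStep, hr, pvOmin_none_right, pvOmin]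
  | some r =>
    obtain ⟨hs, _, _⟩ := pvRank_name hr
    cases ro with
    | none =>
      simp only [pvStep, hr, Option.map_none, Option.map_some, pvOmin]
      rw [hs]
    | some a =>
      simp only [pvStep, hr, Option.map_some, pvOmin_some_some]
      split_ifs with hlt
      · have hm : min a r = r := by omega
        rw [hm, hs]
      · have hm : min a r = a := by omega
        rw [hm]

theorem pvFoldl_step (p : List String) : ∀ ro : Option Int,
    p.foldl pvStep (ro.map (fun r => (r, pvName r))) =
      (pvOmin ro (pvMrank p)).map (fun r => (r, pvName r)) := by
  induction p with
  | nil => intro ro; simp [pvMrank, pvOmin_none_right]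
  | cons s t ih =>
    intro ro
    have : pvMrank (s :: t) = pvOmin (pvRank.get? s) (pvMrank t) := rfl
    rw [this, ← pvOmin_assoc]
    simpa [List.foldl_cons, pvStep_canon ro s] using ih (pvOmin ro (pvRank.get? s))

theorem pvFoldl_none (p : List String) :
    p.foldl pvStep none = (pvMrank p).map (fun r => (r, pvName r)) := by
  have := pvFoldl_step p none
  simpa [pvOmin] using this

theorem pvMrank_none {p : List String} (h : pvMrank p = none) :
    ∀ s ∈ p, pvRank.get? s = none := by
  induction p with
  | nil => simp
  | cons x t ih =>
    have hx : pvOmin (pvRank.get? x) (pvMrank t) = none := h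
    cases hr : pvRank.get? x with
    | some a => rw [hr] at hx; cases hm : pvMrank t <;> simp [hm, pvOmin] at hx
    | none =>
      rw [hr] at hx
      simp only [pvOmin] at hx
      intro s hs
      rcases List.mem_cons.mp hs with h1 | h2
      · rw [h1]; exact hr
      · exact ih hx s h2

theorem pvMrank_mem {p : List String} {r : Int} (h : pvMrank p = some r) :
    pvName r ∈ p := by
  induction p with
  | nil => simp [pvMrank] at h
  | cons x t ih =>
    have hx : pvOmin (pvRank.get? x) (pvMrank t) = some r := h
    cases hr : pvRank.get? x with
    | none =>
      rw [hr] at hx; simp only [pvOmin] at hx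
      exact List.mem_cons_of_mem _ (ih hx)
    | some a =>
      rw [hr] at hx
      cases hm : pvMrank t with
      | none =>
        rw [hm, pvOmin_none_right] at hx
        obtain ⟨hs, _, _⟩ := pvRank_name hr
        have : r = a := by injection hx with h'; omega
        subst this
        rw [← hs]
        exact List.mem_cons_self
      | some b =>
        rw [hm, pvOmin_some_some] at hx
        have hr' : r = min a b := by injection hx with h'; omega
        by_cases hab : a ≤ b
        · obtain ⟨hs, _, _⟩ := pvRank_name hr
          have : r = a := by omega
          rw [this, ← hs]; exact List.mem_cons_self
        · have hb : r = b := by omega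
          rw [← hb] at hm
          exact List.mem_cons_of_mem _ (ih hm)

theorem pvMrank_le {p : List String} {s : String} {a : Int}
    (hr : pvRank.get? s = some a) (hm : s ∈ p) :
    ∃ r, pvMrank p = some r ∧ r ≤ a := by
  induction p with
  | nil => simp at hm
  | cons x t ih =>
    have hx : pvMrank (x :: t) = pvOmin (pvRank.get? x) (pvMrank t) := rfl
    rcases List.mem_cons.mp hm with h1 | h2
    · subst h1
      rw [hx, hr]
      cases hmt : pvMrank t with
      | none => exact ⟨a, by rw [pvOmin_none_right], le_refl a⟩
      | some b => exact ⟨min a b, by rw [pvOmin_some_some], min_le_left a b⟩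
    · obtain ⟨r, hrt, hra⟩ := ih h2
      rw [hx, hrt]
      cases hrx : pvRank.get? x with
      | none => exact ⟨r, rfl, hra⟩
      | some c => exact ⟨min c r, by rw [pvOmin_some_some], le_trans (min_le_right c r) hra⟩

theorem pvMrank_range {p : List String} {r : Int} (h : pvMrank p = some r) :
    0 ≤ r ∧ r ≤ 5 := by
  induction p generalizing r with
  | nil => simp [pvMrank] at h
  | cons x t ih =>
    have hx : pvOmin (pvRank.get? x) (pvMrank t) = some r := h
    cases hr : pvRank.get? x with
    | none => rw [hr] at hx; exact ih hx
    | some a =>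
      rw [hr] at hx
      obtain ⟨_, ha0, ha5⟩ := pvRank_name hr
      cases hm : pvMrank t with
      | none => rw [hm, pvOmin_none_right] at hx; injection hx with h'; omega
      | some b =>
        rw [hm, pvOmin_some_some] at hx
        obtain ⟨hb0, hb5⟩ := ih hm
        injection hx with h'
        omega

-- decided lookups for the six concrete names
theorem pvRank_w780 : pvRank.get? "w780" = some 0 := by decide
theorem pvRank_w500 : pvRank.get? "w500" = some 1 := by decide
theorem pvRank_w342 : pvRank.get? "w342" = some 2 := by decide
theorem pvRank_w300 : pvRank.get? "w300" = some 3 := by decide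
theorem pvRank_w185 : pvRank.get? "w185" = some 4 := by decide
theorem pvRank_orig : pvRank.get? "original" = some 5 := by decide

theorem pvLoopA_eq (sizes : List String) :
    pvLoopA sizes ["w780", "w500", "w342", "w300", "w185", "original"] =
      (pvMrank sizes).map pvName := by
  cases hm : pvMrank sizes with
  | none =>
    have hall := pvMrank_none hm
    have h0 : "w780" ∉ sizes := fun h => by simpa [pvRank_w780] using hall _ h
    have h1 : "w500" ∉ sizes := fun h => by simpa [pvRank_w500] using hall _ h
    have h2 : "w342" ∉ sizes := fun h => by simpa [pvRank_w342] using hall _ h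
    have h3 : "w300" ∉ sizes := fun h => by simpa [pvRank_w300] using hall _ h
    have h4 : "w185" ∉ sizes := fun h => by simpa [pvRank_w185] using hall _ h
    have h5 : "original" ∉ sizes := fun h => by simpa [pvRank_orig] using hall _ h
    simp [pvLoopA, h0, h1, h2, h3, h4, h5]
  | some r =>
    have hmem := pvMrank_mem hm
    obtain ⟨hr0, hr5⟩ := pvMrank_range hm
    have hnot : ∀ (c : String) (j : Int), pvRank.get? c = some j → j < r → c ∉ sizes := by
      intro c j hj hjr hc
      obtain ⟨r', hr', hle⟩ := pvMrank_le hj hc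
      rw [hm] at hr'
      injection hr' with h'
      omega
    interval_cases r <;>
      simp_all [pvName, pvLoopA,
        hnot _ _ pvRank_w780, hnot _ _ pvRank_w500, hnot _ _ pvRank_w342,
        hnot _ _ pvRank_w300, hnot _ _ pvRank_w185]

-- ===== VERDICT (by name: the statement is the Claim_ definition above) =====
theorem preferred_size_py_spec : Claim_equal_preferred_size_py := by
  intro sizes _
  unfold Spec_preferred_size_py preferred_size_py preferred_size_py_alt
  by_cases h : sizes = []
  · simp [h]
  · rw [if_neg h, if_neg h, pvFoldl_none, pvLoopA_eq]
    cases pvMrank sizes <;> simp
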